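-- pv_equiv track=rewrite | github.com/seruva19/takenoko | src/enhancements/motion_preservation/ewc_helper.py | _is_attention_geometry_param
-- ===== SOURCE A (Python) =====
-- def _is_attention_geometry_param(name: str) -> bool:
--     geometry_tokens = (
--         ".self_attn.q.",
--         ".self_attn.k.",
--         ".self_attn.norm_q.",
--         ".self_attn.norm_k.",
--         ".cross_attn.q.",
--         ".cross_attn.k.",
--         ".cross_attn.norm_q.",
--         ".cross_attn.norm_k.",
--     )
--     return any(token in name for token in geometry_tokens)
-- ===== SOURCE B (Python) =====
-- def _is_attention_geometry_param(name: str) -> bool: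
--     # Single left-to-right scan: at each position, match an attention block
--     # header, then an optional norm prefix, then the q/k component.
--     for i in range(len(name)):
--         for head in (".self_attn.", ".cross_attn."):
--             if name.startswith(head, i):
--                 j = i + len(head)
--                 if name.startswith("norm_", j):
--                     j += 5
--                 if name.startswith("q.", j) or name.startswith("k.", j):
--                     return True
--     return False
-- ===== Notes on version B (the rewrite author's own statement) =====
-- stated objective: alternative
-- what changed: Replaces eight independent substring searches (any(token in name)) with one left-to-right scan over the string that, at each position, matches a structured pattern: attention-block header, optional norm prefix, then the q/k component.
import Mathlib
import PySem

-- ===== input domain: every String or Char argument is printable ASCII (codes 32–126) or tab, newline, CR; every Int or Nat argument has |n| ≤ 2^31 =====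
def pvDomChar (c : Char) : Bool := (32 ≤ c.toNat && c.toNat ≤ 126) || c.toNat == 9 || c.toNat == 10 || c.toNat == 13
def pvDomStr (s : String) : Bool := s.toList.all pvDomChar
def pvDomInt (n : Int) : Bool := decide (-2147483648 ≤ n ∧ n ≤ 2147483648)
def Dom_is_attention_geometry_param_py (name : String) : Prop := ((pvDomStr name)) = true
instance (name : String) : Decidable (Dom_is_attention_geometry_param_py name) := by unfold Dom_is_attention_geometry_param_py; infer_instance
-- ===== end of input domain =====

-- B replaces eight independent substring searches with one left-to-right scan matching a
-- structured pattern (attention header, optional norm prefix, q/k component) at each position.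
set_option maxHeartbeats 1000000


-- ===== PORT A =====
def is_attention_geometry_param_py (name : String) : Bool :=
  [".self_attn.q.", ".self_attn.k.", ".self_attn.norm_q.", ".self_attn.norm_k.",
   ".cross_attn.q.", ".cross_attn.k.", ".cross_attn.norm_q.", ".cross_attn.norm_k."].any
    (fun token => PySem.Str.isIn token name)

-- ===== PORT B =====
-- tail check: optional norm prefix, then the q/k component
def pvTailCheck (t : List Char) : Bool :=
  let t' := if "norm_".toList.isPrefixOf t then t.drop 5 else t
  "q.".toList.isPrefixOf t' || "k.".toList.isPrefixOf t'

-- one position: either header (lengths 11 and 12) followed by the tail pattern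
def pvCheckAt (s : List Char) : Bool :=
  (".self_attn.".toList.isPrefixOf s && pvTailCheck (s.drop 11))
  || (".cross_attn.".toList.isPrefixOf s && pvTailCheck (s.drop 12))

-- the position loop, as structural recursion over successive suffixes
def pvScan : List Char → Bool
  | [] => false
  | c :: rest => pvCheckAt (c :: rest) || pvScan rest

def is_attention_geometry_param_py_alt (name : String) : Bool := pvScan name.toList

-- ===== PRECONDITION & SPEC =====
def Spec_is_attention_geometry_param_py (name : String) (out : Bool) : Prop := out = is_attention_geometry_param_py_alt name
instance (name : String) (out : Bool) : Decidable (Spec_is_attention_geometry_param_py name out) := by unfold Spec_is_attention_geometry_param_py; infer_instance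

-- ===== CLAIM (what is proved, stated in full; the proofs are below) =====
def Claim_equal_is_attention_geometry_param_py : Prop := ∀ (name : String), Dom_is_attention_geometry_param_py name → Spec_is_attention_geometry_param_py name (is_attention_geometry_param_py name)

-- ===== LEMMAS AND PROOFS =====

-- splitting a prefix test along an append
theorem pv_prefix_append_iff {α : Type} (a b s : List α) :
    (a ++ b) <+: s ↔ a <+: s ∧ b <+: s.drop a.length := by
  constructor
  · rintro ⟨t, ht⟩
    subst ht
    refine ⟨⟨b ++ t, by simp⟩, ?_⟩
    simp
  · rintro ⟨⟨u, hu⟩, hb⟩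
    subst hu
    simp only [List.drop_left] at hb
    obtain ⟨v, hv⟩ := hb
    exact ⟨v, by simp [hv]⟩

-- two nonempty prefixes of the same list share their first element
theorem pv_prefix_head_eq {p q t : List Char} (hp : p <+: t) (hq : q <+: t)
    (hpn : p ≠ []) (hqn : q ≠ []) : p.head? = q.head? := by
  obtain ⟨u, hu⟩ := hp
  obtain ⟨v, hv⟩ := hq
  have h := hu.trans hv.symm
  cases p with
  | nil => exact absurd rfl hpn
  | cons a l =>
    cases q with
    | nil => exact absurd rfl hqn
    | cons b m =>
      injection h with h1 _
      simp [h1]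

theorem pv_tailCheck_iff (t : List Char) :
    pvTailCheck t = true ↔
      ("q.".toList <+: t ∨ "k.".toList <+: t ∨
       "norm_q.".toList <+: t ∨ "norm_k.".toList <+: t) := by
  unfold pvTailCheck
  by_cases hn : "norm_".toList <+: t
  · simp only [List.isPrefixOf_iff_prefix, if_pos hn, Bool.or_eq_true]
    have hl : ("norm_".toList : List Char).length = 5 := by decide
    have hq : "norm_q.".toList <+: t ↔ "q.".toList <+: t.drop 5 := by
      have he : ("norm_q.".toList : List Char) = "norm_".toList ++ "q.".toList := by decide
      rw [he, pv_prefix_append_iff, hl]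
      exact ⟨fun h => h.2, fun h => ⟨hn, h⟩⟩
    have hk : "norm_k.".toList <+: t ↔ "k.".toList <+: t.drop 5 := by
      have he : ("norm_k.".toList : List Char) = "norm_".toList ++ "k.".toList := by decide
      rw [he, pv_prefix_append_iff, hl]
      exact ⟨fun h => h.2, fun h => ⟨hn, h⟩⟩
    constructor
    · rintro (h | h)
      · exact Or.inr (Or.inr (Or.inl (hq.mpr h)))
      · exact Or.inr (Or.inr (Or.inr (hk.mpr h)))
    · rintro (h | h | h | h)
      · exact absurd (pv_prefix_head_eq h hn (by decide) (by decide)) (by decide)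
      · exact absurd (pv_prefix_head_eq h hn (by decide) (by decide)) (by decide)
      · exact Or.inl (hq.mp h)
      · exact Or.inr (hk.mp h)
  · simp only [List.isPrefixOf_iff_prefix, if_neg hn, Bool.or_eq_true]
    have hq : ¬ "norm_q.".toList <+: t := fun h => hn (by
      have : ("norm_".toList : List Char) <+: "norm_q.".toList := by decide
      exact this.trans h)
    have hk : ¬ "norm_k.".toList <+: t := fun h => hn (by
      have : ("norm_".toList : List Char) <+: "norm_k.".toList := by decide
      exact this.trans h)
    tauto

theorem pv_checkAt_iff (s : List Char) :
    pvCheckAt s = true ↔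
      (".self_attn.q.".toList <+: s ∨ ".self_attn.k.".toList <+: s ∨
       ".self_attn.norm_q.".toList <+: s ∨ ".self_attn.norm_k.".toList <+: s ∨
       ".cross_attn.q.".toList <+: s ∨ ".cross_attn.k.".toList <+: s ∨
       ".cross_attn.norm_q.".toList <+: s ∨ ".cross_attn.norm_k.".toList <+: s) := by
  have hl11 : (".self_attn.".toList : List Char).length = 11 := by decide
  have hl12 : (".cross_attn.".toList : List Char).length = 12 := by decide
  have e1 : (".self_attn.q.".toList : List Char) = ".self_attn.".toList ++ "q.".toList := by decide
  have e2 : (".self_attn.k.".toList : List Char) = ".self_attn.".toList ++ "k.".toList := by decide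
  have e3 : (".self_attn.norm_q.".toList : List Char) = ".self_attn.".toList ++ "norm_q.".toList := by decide
  have e4 : (".self_attn.norm_k.".toList : List Char) = ".self_attn.".toList ++ "norm_k.".toList := by decide
  have e5 : (".cross_attn.q.".toList : List Char) = ".cross_attn.".toList ++ "q.".toList := by decide
  have e6 : (".cross_attn.k.".toList : List Char) = ".cross_attn.".toList ++ "k.".toList := by decide
  have e7 : (".cross_attn.norm_q.".toList : List Char) = ".cross_attn.".toList ++ "norm_q.".toList := by decide
  have e8 : (".cross_attn.norm_k.".toList : List Char) = ".cross_attn.".toList ++ "norm_k.".toList := by decide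
  unfold pvCheckAt
  rw [e1, e2, e3, e4, e5, e6, e7, e8]
  simp only [pv_prefix_append_iff, hl11, hl12, Bool.or_eq_true, Bool.and_eq_true,
    List.isPrefixOf_iff_prefix, pv_tailCheck_iff]
  constructor
  · rintro (⟨hA, (h | h | h | h)⟩ | ⟨hC, (h | h | h | h)⟩)
    exacts [Or.inl ⟨hA, h⟩,
      Or.inr (Or.inl ⟨hA, h⟩),
      Or.inr (Or.inr (Or.inl ⟨hA, h⟩)),
      Or.inr (Or.inr (Or.inr (Or.inl ⟨hA, h⟩))),
      Or.inr (Or.inr (Or.inr (Or.inr (Or.inl ⟨hC, h⟩)))),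
      Or.inr (Or.inr (Or.inr (Or.inr (Or.inr (Or.inl ⟨hC, h⟩))))),
      Or.inr (Or.inr (Or.inr (Or.inr (Or.inr (Or.inr (Or.inl ⟨hC, h⟩)))))),
      Or.inr (Or.inr (Or.inr (Or.inr (Or.inr (Or.inr (Or.inr ⟨hC, h⟩))))))]
  · rintro (⟨hA, h⟩ | ⟨hA, h⟩ | ⟨hA, h⟩ | ⟨hA, h⟩ | ⟨hC, h⟩ | ⟨hC, h⟩ | ⟨hC, h⟩ | ⟨hC, h⟩)
    exacts [Or.inl ⟨hA, Or.inl h⟩,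
      Or.inl ⟨hA, Or.inr (Or.inl h)⟩,
      Or.inl ⟨hA, Or.inr (Or.inr (Or.inl h))⟩,
      Or.inl ⟨hA, Or.inr (Or.inr (Or.inr h))⟩,
      Or.inr ⟨hC, Or.inl h⟩,
      Or.inr ⟨hC, Or.inr (Or.inl h)⟩,
      Or.inr ⟨hC, Or.inr (Or.inr (Or.inl h))⟩,
      Or.inr ⟨hC, Or.inr (Or.inr (Or.inr h))⟩]

theorem pv_scan_iff (cs : List Char) :
    pvScan cs = true ↔ ∃ j, pvCheckAt (cs.drop j) = true := by
  induction cs with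
  | nil =>
    simp only [pvScan, List.drop_nil]
    constructor
    · intro h; exact absurd h (by decide)
    · rintro ⟨j, hj⟩; exact absurd hj (by decide)
  | cons c rest ih =>
    simp only [pvScan, Bool.or_eq_true, ih]
    constructor
    · rintro (h | ⟨j, hj⟩)
      · exact ⟨0, h⟩
      · exact ⟨j + 1, by simpa using hj⟩
    · rintro ⟨j, hj⟩
      cases j with
      | zero => exact Or.inl (by simpa using hj)
      | succ j => exact Or.inr ⟨j, by simpa using hj⟩

-- ===== VERDICT (by name: the statement is the Claim_ definition above) =====
theorem is_attention_geometry_param_py_spec : Claim_equal_is_attention_geometry_param_py := by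
  intro name _
  unfold Spec_is_attention_geometry_param_py
  unfold is_attention_geometry_param_py is_attention_geometry_param_py_alt
  rw [Bool.eq_iff_iff]
  simp only [List.any_cons, List.any_nil, Bool.or_eq_true, Bool.or_false,
    PySem.Str.isIn_eq, ← PySem.Chars.exists_prefix_drop_iff_isIn, pv_scan_iff]
  constructor
  · rintro (⟨j, h⟩ | ⟨j, h⟩ | ⟨j, h⟩ | ⟨j, h⟩ | ⟨j, h⟩ | ⟨j, h⟩ | ⟨j, h⟩ | ⟨j, h⟩)
    exacts [⟨j, (pv_checkAt_iff _).mpr (Or.inl h)⟩,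
      ⟨j, (pv_checkAt_iff _).mpr (Or.inr (Or.inl h))⟩,
      ⟨j, (pv_checkAt_iff _).mpr (Or.inr (Or.inr (Or.inl h)))⟩,
      ⟨j, (pv_checkAt_iff _).mpr (Or.inr (Or.inr (Or.inr (Or.inl h))))⟩,
      ⟨j, (pv_checkAt_iff _).mpr (Or.inr (Or.inr (Or.inr (Or.inr (Or.inl h)))))⟩,
      ⟨j, (pv_checkAt_iff _).mpr (Or.inr (Or.inr (Or.inr (Or.inr (Or.inr (Or.inl h))))))⟩,
      ⟨j, (pv_checkAt_iff _).mpr (Or.inr (Or.inr (Or.inr (Or.inr (Or.inr (Or.inr (Or.inl h)))))))⟩,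
      ⟨j, (pv_checkAt_iff _).mpr (Or.inr (Or.inr (Or.inr (Or.inr (Or.inr (Or.inr (Or.inr h)))))))⟩]
  · rintro ⟨j, h⟩
    rcases (pv_checkAt_iff _).mp h with h | h | h | h | h | h | h | h <;>
      [exact Or.inl ⟨j, h⟩;
       exact Or.inr (Or.inl ⟨j, h⟩);
       exact Or.inr (Or.inr (Or.inl ⟨j, h⟩));
       exact Or.inr (Or.inr (Or.inr (Or.inl ⟨j, h⟩)));
       exact Or.inr (Or.inr (Or.inr (Or.inr (Or.inl ⟨j, h⟩))));
       exact Or.inr (Or.inr (Or.inr (Or.inr (Or.inr (Or.inl ⟨j, h⟩)))));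
       exact Or.inr (Or.inr (Or.inr (Or.inr (Or.inr (Or.inr (Or.inl ⟨j, h⟩))))));
       exact Or.inr (Or.inr (Or.inr (Or.inr (Or.inr (Or.inr (Or.inr ⟨j, h⟩))))))]
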